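-- pv_equiv track=rewrite | github.com/apraveena/Interview_Prep_SecondRound | Recursion/PermutationsWithoutRepetitions.py | permutations_for_string_result
-- ===== SOURCE A (Python) =====
-- def permutations_for_string_result(s):
--     result = []
--     def helper(slate, arr):
--         if len(arr) == 0:
--             result.append(slate)
--             return
--
--         for idx, ltr in enumerate(arr):
--             helper(ltr + slate, arr[:idx] + arr[idx + 1:])
--
--     helper("", s)
--     return result
-- ===== SOURCE B (Python) =====
-- import itertools
--
-- def permutations_for_string_result(s):
--     return [''.join(p)[::-1] for p in itertools.permutations(s)]
-- ===== Notes on version B (the rewrite author's own statement) =====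
-- stated objective: idiomatic
-- what changed: Replaces the hand-written recursive backtracking helper (which prepends each chosen char and rebuilds the remainder by slicing) with a one-line comprehension over itertools.permutations, joining each tuple and reversing it to reproduce A's exact order.
import Mathlib
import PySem

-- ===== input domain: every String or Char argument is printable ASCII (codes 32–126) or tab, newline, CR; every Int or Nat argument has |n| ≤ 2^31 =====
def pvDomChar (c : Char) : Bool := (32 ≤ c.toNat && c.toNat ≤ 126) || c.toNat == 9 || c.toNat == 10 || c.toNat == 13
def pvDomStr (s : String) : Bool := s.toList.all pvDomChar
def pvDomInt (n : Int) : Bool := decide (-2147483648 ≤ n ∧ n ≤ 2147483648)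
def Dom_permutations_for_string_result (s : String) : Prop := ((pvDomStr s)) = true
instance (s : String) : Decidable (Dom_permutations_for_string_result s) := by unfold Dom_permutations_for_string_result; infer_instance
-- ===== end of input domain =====

-- B replaces A's hand-written backtracking with itertools.permutations plus a join/reverse per tuple (objective: idiomatic; same output, same order).

-- ===== PORT A =====
-- A's helper: recursive backtracking; 'for idx, ltr in enumerate(arr)' is the index loop,
-- arr[:idx] + arr[idx+1:] is take idx ++ drop (idx+1) (exact: idx is a Nat index < len(arr)),
-- 'ltr + slate' prepends the char, the base case appends the slate to the result list.
def pvHelperA (slate : List Char) (arr : List Char) : List String :=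
  if h : arr.length = 0 then [String.mk slate]
  else
    (List.range arr.length).attach.flatMap fun ⟨idx, hm⟩ =>
      pvHelperA (arr[idx]'(List.mem_range.mp hm) :: slate) (arr.take idx ++ arr.drop (idx + 1))
termination_by arr.length
decreasing_by
  have hi : idx < arr.length := List.mem_range.mp hm
  simp [List.length_take, List.length_drop]
  omega

def permutations_for_string_result (s : String) : List String :=
  pvHelperA [] s.toList

-- ===== PORT B =====
-- itertools.permutations in its documented order: pick each element in index order first,
-- then recurse on the remainder.
def pvItertoolsPerms (arr : List Char) : List (List Char) :=
  if h : arr.length = 0 then [[]]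
  else
    (List.range arr.length).attach.flatMap fun ⟨i, hm⟩ =>
      (pvItertoolsPerms (arr.take i ++ arr.drop (i + 1))).map
        (fun p => arr[i]'(List.mem_range.mp hm) :: p)
termination_by arr.length
decreasing_by
  have hi : i < arr.length := List.mem_range.mp hm
  simp [List.length_take, List.length_drop]
  omega

-- [''.join(p)[::-1] for p in itertools.permutations(s)]
def permutations_for_string_result_alt (s : String) : List String :=
  (pvItertoolsPerms s.toList).map (fun p => String.mk p.reverse)

-- ===== PRECONDITION & SPEC =====
def Spec_permutations_for_string_result (s : String) (out : List String) : Prop := out = permutations_for_string_result_alt s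
instance (s : String) (out : List String) : Decidable (Spec_permutations_for_string_result s out) := by unfold Spec_permutations_for_string_result; infer_instance

-- ===== CLAIM (what is proved, stated in full; the proofs are below) =====
def Claim_equal_permutations_for_string_result : Prop := ∀ (s : String), Dom_permutations_for_string_result s → Spec_permutations_for_string_result s (permutations_for_string_result s)

-- ===== LEMMAS AND PROOFS =====

lemma pvHelperA_eq_perms (n : Nat) :
    ∀ (arr : List Char), arr.length ≤ n → ∀ (slate : List Char),
      pvHelperA slate arr
        = (pvItertoolsPerms arr).map (fun p => String.mk (p.reverse ++ slate)) := by
  induction n with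
  | zero =>
    intro arr hlen slate
    have h0 : arr.length = 0 := Nat.le_zero.mp hlen
    rw [pvHelperA, pvItertoolsPerms]
    simp [h0]
  | succ m ih =>
    intro arr hlen slate
    rw [pvHelperA, pvItertoolsPerms]
    by_cases h0 : arr.length = 0
    · simp [h0]
    · simp only [h0, dite_false, List.map_flatMap]
      apply List.flatMap_congr
      rintro ⟨idx, hm⟩ _
      have hi : idx < arr.length := List.mem_range.mp hm
      have hlen' : (arr.take idx ++ arr.drop (idx + 1)).length ≤ m := by
        simp [List.length_take, List.length_drop]
        omega
      rw [ih _ hlen' (arr[idx] :: slate), List.map_map]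
      apply List.map_congr_left
      intro p _
      simp

-- ===== VERDICT (by name: the statement is the Claim_ definition above) =====
theorem permutations_for_string_result_spec : Claim_equal_permutations_for_string_result := by
  intro s _
  unfold Spec_permutations_for_string_result permutations_for_string_result
    permutations_for_string_result_alt
  rw [pvHelperA_eq_perms s.toList.length s.toList le_rfl []]
  simp
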